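-- pv_equiv track=rewrite | github.com/nobug-code/Algorithm | Startup/Bcompany/b_2.py | max_inversions
-- ===== SOURCE A (Python) =====
-- def max_inversions(prices):
--     # Initialize result
--     invcount = 0
--
--     for i in range(1, len(prices) - 1):
--         small = 0
--         for j in range(i + 1,  len(prices)):
--             if prices[i] > prices[j]:
--                 small += 1
--
--         big = 0;
--         for j in range(i - 1, -1, -1):
--             if prices[i] < prices[j]:
--                 big += 1
--
--         invcount += big * small
--
--     return invcount
-- ===== SOURCE B (Python) =====
-- def max_inversions(prices):
--     # One triangular pass over index pairs fills both count arrays at once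
--     # (each pair compared once), then a dot product of the arrays gives the
--     # sum of big*small over middle elements.
--     n = len(prices)
--     smaller = [0] * n
--     bigger = [0] * n
--     for i in range(n):
--         for j in range(i + 1, n):
--             if prices[i] > prices[j]:
--                 smaller[i] += 1
--                 bigger[j] += 1
--     total = 0
--     for k in range(n):
--         total += bigger[k] * smaller[k]
--     return total
-- ===== Notes on version B (the rewrite author's own statement) =====
-- stated objective: alternative
-- what changed: Instead of rescanning left and right of every middle element, B makes a single triangular pass over index pairs (i,j), i<j, filling two count arrays (smaller-after for i, greater-before for j) at once — each pair is compared exactly once — and finishes with a dot product of the two arrays.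
import Mathlib
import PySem

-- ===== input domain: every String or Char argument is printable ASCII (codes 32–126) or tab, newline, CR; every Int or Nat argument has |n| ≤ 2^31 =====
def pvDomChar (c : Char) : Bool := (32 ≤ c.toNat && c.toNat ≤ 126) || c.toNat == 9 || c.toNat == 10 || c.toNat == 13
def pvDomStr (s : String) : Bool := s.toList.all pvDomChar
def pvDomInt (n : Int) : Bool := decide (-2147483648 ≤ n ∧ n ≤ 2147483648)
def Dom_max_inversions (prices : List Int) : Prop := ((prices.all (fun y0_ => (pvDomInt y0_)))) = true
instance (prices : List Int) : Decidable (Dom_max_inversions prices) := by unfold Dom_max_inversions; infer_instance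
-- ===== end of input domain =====

-- B replaces A's per-middle left/right rescans by one triangular pass over index
-- pairs filling two count arrays, finished by a dot product (alternative decomposition, same asymptotic cost).


-- ===== PORT A =====
def max_inversions (prices : List Int) : Int :=
  (PySem.List.pyRange 1 ((prices.length : Int) - 1) 1).foldl
    (fun invcount i =>
      let small : Int := (PySem.List.pyRange (i + 1) (prices.length : Int) 1).foldl
        (fun s j => if PySem.List.pyGetD prices i 0 > PySem.List.pyGetD prices j 0 then s + 1 else s) 0
      let big : Int := (PySem.List.pyRange (i - 1) (-1) (-1)).foldl
        (fun b j => if PySem.List.pyGetD prices i 0 < PySem.List.pyGetD prices j 0 then b + 1 else b) 0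
      invcount + big * small) 0

-- ===== PORT B =====
def max_inversions_alt (prices : List Int) : Int :=
  let n := prices.length
  let st := (List.range n).foldl
    (fun (st : List Int × List Int) i =>
      (List.range' (i + 1) (n - (i + 1))).foldl
        (fun (st : List Int × List Int) j =>
          if prices.getD i 0 > prices.getD j 0 then
            (st.1.set i (st.1.getD i 0 + 1), st.2.set j (st.2.getD j 0 + 1))
          else st) st)
    (List.replicate n 0, List.replicate n 0)
  (List.range n).foldl (fun total k => total + st.2.getD k 0 * st.1.getD k 0) 0

-- ===== PRECONDITION & SPEC =====
def Spec_max_inversions (prices : List Int) (out : Int) : Prop := out = max_inversions_alt prices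
instance (prices : List Int) (out : Int) : Decidable (Spec_max_inversions prices out) := by unfold Spec_max_inversions; infer_instance

-- ===== CLAIM (what is proved, stated in full; the proofs are below) =====
def Claim_equal_max_inversions : Prop := ∀ (prices : List Int), Dom_max_inversions prices → Spec_max_inversions prices (max_inversions prices)

-- ===== LEMMAS AND PROOFS =====

def Scnt (a : List Int) (k : Nat) : Int := ((a.drop (k + 1)).countP (fun x => x < a.getD k 0) : Int)
def Bcnt (a : List Int) (k : Nat) : Int := ((a.take k).countP (fun x => a.getD k 0 < x) : Int)

def istep (a : List Int) (i : Nat) : List Int × List Int → Nat → List Int × List Int :=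
  fun st j =>
    if a.getD i 0 > a.getD j 0 then
      (st.1.set i (st.1.getD i 0 + 1), st.2.set j (st.2.getD j 0 + 1))
    else st

def ostep (a : List Int) : List Int × List Int → Nat → List Int × List Int :=
  fun st i => (List.range' (i + 1) (a.length - (i + 1))).foldl (istep a i) st

theorem getD_set_int (l : List Int) (m k : Nat) (v : Int) :
    (l.set m v).getD k 0 = if k = m ∧ m < l.length then v else l.getD k 0 := by
  simp only [List.getD_eq_getElem?_getD, List.getElem?_set]
  split_ifs with h1 h2 h3 h4 <;> simp_all

theorem dropD (a : List Int) (j : Nat) (h : j < a.length) :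
    a.drop j = a.getD j 0 :: a.drop (j + 1) := by
  rw [List.getD_eq_getElem?_getD, List.getElem?_eq_getElem h]
  exact List.drop_eq_getElem_cons h

theorem takeD (a : List Int) (m : Nat) (h : m < a.length) :
    a.take (m + 1) = a.take m ++ [a.getD m 0] := by
  rw [List.getD_eq_getElem?_getD, List.getElem?_eq_getElem h]
  rw [List.take_add_one, List.getElem?_eq_getElem h]
  rfl

theorem inner_spec (a : List Int) (i : Nat) (hi : i < a.length) :
    ∀ (c j0 : Nat) (sm bg : List Int), a.length - j0 = c → i < j0 →
      sm.length = a.length → bg.length = a.length →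
    ((List.range' j0 c).foldl (istep a i) (sm, bg)).1.length = a.length
    ∧ ((List.range' j0 c).foldl (istep a i) (sm, bg)).2.length = a.length
    ∧ (∀ k : Nat, ((List.range' j0 c).foldl (istep a i) (sm, bg)).1.getD k 0
        = sm.getD k 0 + (if k = i then ((a.drop j0).countP (fun x => x < a.getD i 0) : Int) else 0))
    ∧ (∀ k : Nat, k < a.length → ((List.range' j0 c).foldl (istep a i) (sm, bg)).2.getD k 0
        = bg.getD k 0 + (if j0 ≤ k ∧ a.getD k 0 < a.getD i 0 then 1 else 0)) := by
  intro c
  induction c with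
  | zero =>
    intro j0 sm bg hc hij hsm hbg
    have hj0 : a.length ≤ j0 := by omega
    simp only [List.range'_zero, List.foldl_nil]
    refine ⟨hsm, hbg, ?_, ?_⟩
    · intro k
      rw [List.drop_eq_nil_of_le hj0]
      simp
    · intro k hk
      have : ¬ (j0 ≤ k ∧ a.getD k 0 < a.getD i 0) := by
        rintro ⟨h1, _⟩; omega
      rw [if_neg this, add_zero]
  | succ c ih =>
    intro j0 sm bg hc hij hsm hbg
    have hj0 : j0 < a.length := by omega
    rw [List.range'_succ, List.foldl_cons]
    have hstep : istep a i (sm, bg) j0 =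
        (if a.getD i 0 > a.getD j0 0 then sm.set i (sm.getD i 0 + 1) else sm,
         if a.getD i 0 > a.getD j0 0 then bg.set j0 (bg.getD j0 0 + 1) else bg) := by
      unfold istep
      split_ifs <;> rfl
    rw [hstep]
    obtain ⟨L1, L2, P1, P2⟩ := ih (j0 + 1)
      (if a.getD i 0 > a.getD j0 0 then sm.set i (sm.getD i 0 + 1) else sm)
      (if a.getD i 0 > a.getD j0 0 then bg.set j0 (bg.getD j0 0 + 1) else bg)
      (by omega) (by omega)
      (by split_ifs <;> simp [hsm])
      (by split_ifs <;> simp [hbg])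
    refine ⟨L1, L2, ?_, ?_⟩
    · intro k
      rw [P1 k, dropD a j0 hj0, List.countP_cons]
      by_cases hcmp : a.getD i 0 > a.getD j0 0
      · rw [if_pos hcmp, getD_set_int]
        have hd : decide (a.getD j0 0 < a.getD i 0) = true := by
          simp only [decide_eq_true_eq]; omega
        rw [hd]
        by_cases hk : k = i
        · subst hk
          rw [if_pos ⟨rfl, by omega⟩, if_pos rfl, if_pos rfl]
          simp only [if_true]
          push_cast
          ring
        · rw [if_neg (by tauto), if_neg hk, if_neg hk]
      · rw [if_neg hcmp]
        have hd : decide (a.getD j0 0 < a.getD i 0) = false := by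
          simp only [decide_eq_false_iff_not]; omega
        rw [hd]
        by_cases hk : k = i
        · rw [if_pos hk, if_pos hk]
          push_cast
          ring
        · rw [if_neg hk, if_neg hk]
    · intro k hk
      rw [P2 k hk]
      by_cases hcmp : a.getD i 0 > a.getD j0 0
      · rw [if_pos hcmp, getD_set_int]
        by_cases hkj : k = j0
        · subst hkj
          rw [if_pos ⟨rfl, by omega⟩,
            if_neg (show ¬ (k + 1 ≤ k ∧ a.getD k 0 < a.getD i 0) by omega),
            if_pos ⟨le_refl k, by omega⟩]
          ring
        · rw [if_neg (by tauto)]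
          have he : (j0 + 1 ≤ k ∧ a.getD k 0 < a.getD i 0) ↔ (j0 ≤ k ∧ a.getD k 0 < a.getD i 0) := by
            constructor <;> rintro ⟨h1, h2⟩ <;> refine ⟨by omega, h2⟩
          simp only [he]
      · rw [if_neg hcmp]
        have he : (j0 + 1 ≤ k ∧ a.getD k 0 < a.getD i 0) ↔ (j0 ≤ k ∧ a.getD k 0 < a.getD i 0) := by
          constructor <;> rintro ⟨h1, h2⟩
          · exact ⟨by omega, h2⟩
          · have hkj : k ≠ j0 := by intro e; rw [e] at h2; omega
            exact ⟨by omega, h2⟩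
        simp only [he]

theorem getD_replicate_zero (n k : Nat) :
    (List.replicate n (0 : Int)).getD k 0 = 0 := by
  rw [List.getD_eq_getElem?_getD, List.getElem?_replicate]
  split_ifs <;> rfl

theorem outer_spec (a : List Int) :
    ∀ (m : Nat), m ≤ a.length →
    ((List.range m).foldl (ostep a) (List.replicate a.length 0, List.replicate a.length 0)).1.length = a.length
    ∧ ((List.range m).foldl (ostep a) (List.replicate a.length 0, List.replicate a.length 0)).2.length = a.length
    ∧ (∀ k : Nat, ((List.range m).foldl (ostep a) (List.replicate a.length 0, List.replicate a.length 0)).1.getD k 0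
        = if k < m then Scnt a k else 0)
    ∧ (∀ k : Nat, k < a.length →
        ((List.range m).foldl (ostep a) (List.replicate a.length 0, List.replicate a.length 0)).2.getD k 0
        = ((a.take (min m k)).countP (fun x => a.getD k 0 < x) : Int)) := by
  intro m
  induction m with
  | zero =>
    intro _
    simp only [List.range_zero, List.foldl_nil]
    refine ⟨by simp, by simp, ?_, ?_⟩
    · intro k
      rw [getD_replicate_zero]
      simp
    · intro k hk
      rw [getD_replicate_zero]
      simp
  | succ m ih =>
    intro hm
    obtain ⟨L1, L2, Q1, Q2⟩ := ih (by omega)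
    rw [List.range_succ, List.foldl_append, List.foldl_cons, List.foldl_nil]
    set G := (List.range m).foldl (ostep a) (List.replicate a.length 0, List.replicate a.length 0) with hG
    have hGpair : G = (G.1, G.2) := rfl
    have hm' : m < a.length := by omega
    obtain ⟨R1, R2, S1, S2⟩ := inner_spec a m hm' (a.length - (m + 1)) (m + 1) G.1 G.2
      rfl (by omega) L1 L2
    have hostep : ostep a G m
        = (List.range' (m + 1) (a.length - (m + 1))).foldl (istep a m) (G.1, G.2) := by
      rw [← hGpair]; rfl
    rw [hostep]
    refine ⟨R1, R2, ?_, ?_⟩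
    · intro k
      rw [S1 k, Q1 k]
      by_cases hk : k = m
      · subst hk
        rw [if_neg (lt_irrefl k), if_pos rfl, if_pos (by omega)]
        rw [zero_add]
        rfl
      · rw [if_neg hk, add_zero]
        by_cases hlt : k < m
        · rw [if_pos hlt, if_pos (by omega)]
        · rw [if_neg hlt, if_neg (by omega)]
    · intro k hk
      rw [S2 k hk, Q2 k hk]
      by_cases hkm : k ≤ m
      · have h1 : min m k = k := by omega
        have h2 : min (m + 1) k = k := by omega
        rw [h1, h2, if_neg (show ¬ (m + 1 ≤ k ∧ a.getD k 0 < a.getD m 0) by omega), add_zero]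
      · have h1 : min m k = m := by omega
        have h2 : min (m + 1) k = m + 1 := by omega
        rw [h1, h2, takeD a m hm', List.countP_append]
        by_cases hc : a.getD k 0 < a.getD m 0
        · rw [if_pos ⟨by omega, hc⟩]
          have : List.countP (fun x => decide (a.getD k 0 < x)) [a.getD m 0] = 1 := by
            have hd := decide_eq_true hc
            rw [List.countP_cons, List.countP_nil, hd]
            simp
          rw [this]
          push_cast
          ring
        · rw [if_neg (by tauto)]
          have : List.countP (fun x => decide (a.getD k 0 < x)) [a.getD m 0] = 0 := by
            have hd := decide_eq_false hc
            rw [List.countP_cons, List.countP_nil, hd]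
            simp
          rw [this]
          push_cast
          ring

theorem alt_eq_sum (a : List Int) :
    max_inversions_alt a = ((List.range a.length).map (fun k => Bcnt a k * Scnt a k)).sum := by
  obtain ⟨L1, L2, Q1, Q2⟩ := outer_spec a a.length (le_refl _)
  have h0 : max_inversions_alt a
      = (List.range a.length).foldl
          (fun total k =>
            total + ((List.range a.length).foldl (ostep a)
                (List.replicate a.length 0, List.replicate a.length 0)).2.getD k 0
              * ((List.range a.length).foldl (ostep a)
                (List.replicate a.length 0, List.replicate a.length 0)).1.getD k 0) 0 := rfl
  rw [h0]
  rw [PySem.List.foldl_add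
    (g := fun k => ((List.range a.length).foldl (ostep a)
        (List.replicate a.length 0, List.replicate a.length 0)).2.getD k 0
      * ((List.range a.length).foldl (ostep a)
        (List.replicate a.length 0, List.replicate a.length 0)).1.getD k 0)]
  rw [zero_add]
  apply congrArg
  apply List.map_congr_left
  intro k hk
  have hkn : k < a.length := List.mem_range.mp hk
  rw [Q1 k, Q2 k hkn, if_pos hkn]
  have : min a.length k = k := by omega
  rw [this]
  rfl

def smallF (a : List Int) (i : Int) : Int :=
  (PySem.List.pyRange (i + 1) (a.length : Int) 1).foldl
    (fun s j => if PySem.List.pyGetD a i 0 > PySem.List.pyGetD a j 0 then s + 1 else s) 0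

def bigF (a : List Int) (i : Int) : Int :=
  (PySem.List.pyRange (i - 1) (-1) (-1)).foldl
    (fun b j => if PySem.List.pyGetD a i 0 < PySem.List.pyGetD a j 0 then b + 1 else b) 0

theorem countP_fromto (a : List Int) (p : Int → Bool) (lo : Nat) :
    ∀ m : Nat, m ≤ a.length →
    (PySem.List.pyRange (lo : Int) (m : Int)).countP (fun j => p (PySem.List.pyGetD a j 0))
      = ((a.take m).drop lo).countP p := by
  intro m
  induction m with
  | zero =>
    intro _
    rw [PySem.List.pyRange_one_eq_nil (by omega)]
    simp
  | succ m ih =>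
    intro hm
    by_cases hlo : lo ≤ m
    · rw [show ((m + 1 : Nat) : Int) = (m : Int) + 1 by push_cast; ring,
        PySem.List.pyRange_one_succ_right (by omega), List.countP_append, ih (by omega),
        takeD a m (by omega),
        List.drop_append_of_le_length (by rw [List.length_take]; omega), List.countP_append]
      congr 1
      have hg : PySem.List.pyGetD a ((m : Nat) : Int) 0 = a.getD m 0 :=
        PySem.List.pyGetD_natCast a m 0
      rw [List.countP_cons, List.countP_nil, List.countP_cons, List.countP_nil, hg]
    · rw [PySem.List.pyRange_one_eq_nil (by push_cast; omega)]
      have hnil : ((a.take (m + 1)).drop lo) = [] :=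
        List.drop_eq_nil_of_le (by rw [List.length_take]; omega)
      rw [hnil]
      simp

theorem smallF_eq (a : List Int) (i : Int) (h0 : 0 ≤ i) : smallF a i = Scnt a i.toNat := by
  unfold smallF
  rw [PySem.List.foldl_ite_add_one
    (fun j => PySem.List.pyGetD a i 0 > PySem.List.pyGetD a j 0)
    (PySem.List.pyRange (i + 1) (a.length : Int)) 0, zero_add]
  rw [show PySem.List.pyRange (i + 1) (a.length : Int)
      = PySem.List.pyRange (((i + 1).toNat : Nat) : Int) ((a.length : Nat) : Int) from by
    rw [Int.toNat_of_nonneg (by omega : (0:Int) ≤ i + 1)]]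
  rw [countP_fromto a (fun v => decide (PySem.List.pyGetD a i 0 > v)) (i + 1).toNat a.length
    (le_refl _)]
  rw [List.take_length]
  unfold Scnt
  have ht : (i + 1).toNat = i.toNat + 1 := by omega
  rw [ht]
  congr 1
  apply List.countP_congr
  intro x _
  rw [PySem.List.pyGetD_of_nonneg a 0 h0]

theorem bigF_eq (a : List Int) (i : Int) (h0 : 0 ≤ i) (hle : i ≤ (a.length : Int)) :
    bigF a i = Bcnt a i.toNat := by
  unfold bigF
  rw [PySem.List.foldl_ite_add_one
    (fun j => PySem.List.pyGetD a i 0 < PySem.List.pyGetD a j 0)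
    (PySem.List.pyRange (i - 1) (-1) (-1)) 0, zero_add]
  rw [PySem.List.pyRange_neg_one_eq_reverse, List.countP_reverse]
  rw [show (-1 : Int) + 1 = 0 by ring, show (i - 1) + 1 = i by ring]
  rw [show PySem.List.pyRange 0 i
      = PySem.List.pyRange ((0 : Nat) : Int) ((i.toNat : Nat) : Int) from by
    rw [Int.toNat_of_nonneg h0]; norm_num]
  rw [countP_fromto a (fun v => decide (PySem.List.pyGetD a i 0 < v)) 0 i.toNat (by omega)]
  rw [List.drop_zero]
  unfold Bcnt
  congr 1
  apply List.countP_congr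
  intro x _
  rw [PySem.List.pyGetD_of_nonneg a 0 h0]

theorem a_eq_sum (a : List Int) :
    max_inversions a = ((List.range a.length).map (fun k => Bcnt a k * Scnt a k)).sum := by
  have h0 : max_inversions a
      = (PySem.List.pyRange 1 ((a.length : Int) - 1) 1).foldl
          (fun invcount i => invcount + bigF a i * smallF a i) 0 := rfl
  rw [h0, PySem.List.foldl_add (g := fun i => bigF a i * smallF a i), zero_add]
  have h1 : ((PySem.List.pyRange 1 ((a.length : Int) - 1) 1).map
      (fun i => bigF a i * smallF a i)).sum
      = ((PySem.List.pyRange 1 ((a.length : Int) - 1) 1).map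
      (fun i => Bcnt a i.toNat * Scnt a i.toNat)).sum := by
    apply congrArg
    apply List.map_congr_left
    intro i hi
    have hmem := (PySem.List.mem_pyRange_one).mp hi
    rw [bigF_eq a i (by omega) (by omega), smallF_eq a i (by omega)]
  rw [h1]
  rw [PySem.List.pyRange_one, List.map_map]
  rcases hn : a.length with _ | n
  · simp
  · rcases hn2 : n with _ | m
    · subst hn2
      norm_num
      unfold Bcnt
      simp
    · subst hn2
      have hlen : ((m + 2 : Nat) : Int) - 1 - 1 = (m : Int) := by push_cast; ring
      have hto : (((m + 2 : Nat) : Int) - 1 - 1).toNat = m := by omega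
      rw [hto]
      rw [List.range_succ, List.map_append, List.sum_append]
      have hS : Scnt a (m + 1) = 0 := by
        unfold Scnt
        rw [List.drop_eq_nil_of_le (by omega)]
        simp
      have hlast : ((List.range (m + 1)).map (fun k => Bcnt a k * Scnt a k)).sum
            + Bcnt a (m + 1) * Scnt a (m + 1)
          = ((List.range (m + 1)).map (fun k => Bcnt a k * Scnt a k)).sum := by
        rw [hS, mul_zero, add_zero]
      simp only [List.map_cons, List.sum_cons, List.map_nil, List.sum_nil, add_zero]
      rw [hS, mul_zero, add_zero]
      rw [List.range_succ_eq_map, List.map_cons, List.sum_cons, List.map_map]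
      have hB0 : Bcnt a 0 = 0 := by unfold Bcnt; simp
      rw [hB0, zero_mul, zero_add]
      apply congrArg
      apply List.map_congr_left
      intro k hk
      have : ((1 : Int) + (k : Int)).toNat = Nat.succ k := by omega
      simp only [Function.comp]
      rw [this]

-- ===== VERDICT (by name: the statement is the Claim_ definition above) =====
theorem max_inversions_spec : Claim_equal_max_inversions := by
  intro prices _
  show max_inversions prices = max_inversions_alt prices
  rw [a_eq_sum, alt_eq_sum]
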